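-- pv_equiv track=rewrite | github.com/DSC-Capstone/projects-2019-2020 | project_24/src/get_data.py | vertical_split
-- ===== SOURCE A (Python) =====
-- def vertical_split(x_):
--     '''
--     splits up the vertical column into multiple columns
--     '''
--     first = []
--     second = []
--     third = []
--     for _ in x_:
--         x = _.split(', ')
--         try:
--             first += [x[0]]
--         except: first += ['None']
--         try:
--             second += [x[1]]
--         except: second += ['None']
--         try:
--             third += [x[2]]
--         except: third += ['None']
--     return first, second, third
-- ===== SOURCE B (Python) =====
-- def vertical_split(x_):
--     '''
--     splits up the vertical column into multiple columns
--     '''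
--     flat = []
--     for s in x_:
--         parts = s.split(', ')[:3]
--         flat += parts + ['None'] * (3 - len(parts))
--     return flat[0::3], flat[1::3], flat[2::3]
-- ===== Notes on version B (the rewrite author's own statement) =====
-- stated objective: alternative
-- what changed: Replaces A's three parallel per-field accumulators (with try/except per index) by a single interleaved flat buffer: every string contributes exactly three cells (split fields padded with 'None'), and the three columns are read back with stride-3 slices flat[0::3], flat[1::3], flat[2::3]; one list append via += and C-level slicing replaces 3n Python-level list concatenations and exception handling.
import Mathlib
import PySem

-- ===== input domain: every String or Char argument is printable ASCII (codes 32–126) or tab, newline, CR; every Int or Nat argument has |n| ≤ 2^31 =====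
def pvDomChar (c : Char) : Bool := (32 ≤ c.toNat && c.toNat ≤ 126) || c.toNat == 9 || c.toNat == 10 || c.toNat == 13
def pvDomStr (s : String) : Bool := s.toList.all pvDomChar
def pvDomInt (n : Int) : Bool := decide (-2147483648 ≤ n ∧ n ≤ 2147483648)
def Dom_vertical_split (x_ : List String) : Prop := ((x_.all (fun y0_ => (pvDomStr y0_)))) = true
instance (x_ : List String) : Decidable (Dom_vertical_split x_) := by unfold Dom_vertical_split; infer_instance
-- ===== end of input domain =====

-- B replaces A's three parallel accumulators by one interleaved flat buffer read back by stride-3 slicing (objective: alternative decomposition/data structure, same cost).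

-- ===== PORT A =====
-- literal port of A: three parallel accumulators, per-index lookup with 'None' fallback (the try/except)
def vertical_split (x_ : List String) : List String × List String × List String :=
  x_.foldl (fun acc s =>
    let x := (PySem.Str.split? s ", ").getD []
    let first := acc.1 ++ [match PySem.List.pyGet? x 0 with | some v => v | none => "None"]
    let second := acc.2.1 ++ [match PySem.List.pyGet? x 1 with | some v => v | none => "None"]
    let third := acc.2.2 ++ [match PySem.List.pyGet? x 2 with | some v => v | none => "None"]
    (first, second, third)) ([], [], [])

-- ===== PORT B =====
-- hand port of Python's step-3 slice flat[i::3] (nonnegative start i, step 3): exact, since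
-- flat[i::3] takes the element at i and then every 3rd following element.
def pvStride3 : List String → List String
  | [] => []
  | a :: t => a :: pvStride3 (t.drop 2)
termination_by l => l.length
decreasing_by simp

-- B: one interleaved flat buffer (each string contributes exactly 3 cells, padded with 'None'),
-- then the three columns are read back with stride-3 slices flat[0::3], flat[1::3], flat[2::3].
def vertical_split_alt (x_ : List String) : List String × List String × List String :=
  let flat := x_.foldl (fun acc s =>
    let parts := ((PySem.Str.split? s ", ").getD []).take 3
    acc ++ (parts ++ List.replicate (3 - parts.length) "None")) []
  (pvStride3 flat, pvStride3 (flat.drop 1), pvStride3 (flat.drop 2))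

-- ===== PRECONDITION & SPEC =====
def Spec_vertical_split (x_ : List String) (out : List String × List String × List String) : Prop := out = vertical_split_alt x_
instance (x_ : List String) (out : List String × List String × List String) : Decidable (Spec_vertical_split x_ out) := by unfold Spec_vertical_split; infer_instance

-- ===== CLAIM (what is proved, stated in full; the proofs are below) =====
def Claim_equal_vertical_split : Prop := ∀ (x_ : List String), Dom_vertical_split x_ → Spec_vertical_split x_ (vertical_split x_)

-- ===== LEMMAS AND PROOFS =====

-- the fixed-width (length-3) cell row one string contributes to B's flat buffer
def pvRow (s : String) : List String :=
  let parts := ((PySem.Str.split? s ", ").getD []).take 3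
  parts ++ List.replicate (3 - parts.length) "None"

lemma pvStride3_nil : pvStride3 [] = [] := by
  rw [pvStride3]

lemma pvStride3_cons (a : String) (t : List String) :
    pvStride3 (a :: t) = a :: pvStride3 (t.drop 2) := by
  rw [pvStride3]

lemma pvRow_len (s : String) : (pvRow s).length = 3 := by
  simp [pvRow]; try omega

lemma pvRow_get (s : String) (i : Nat) (hi : i < 3) :
    (pvRow s)[i]?.getD "" =
      (match PySem.List.pyGet? ((PySem.Str.split? s ", ").getD []) ((i : Nat) : Int) with
        | some v => v | none => "None") := by
  rcases h : (PySem.Str.split? s ", ").getD [] with _ | ⟨a, _ | ⟨b, _ | ⟨c, t⟩⟩⟩ <;>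
    interval_cases i <;>
      (simp [pvRow, h, PySem.List.pyGet?, PySem.List.pyIdx?];
       try (rw [if_pos (by omega)]; simp))

lemma flat_eq_flatMap (x_ : List String) (acc : List String) :
    x_.foldl (fun acc s =>
      let parts := ((PySem.Str.split? s ", ").getD []).take 3
      acc ++ (parts ++ List.replicate (3 - parts.length) "None")) acc
    = acc ++ x_.flatMap pvRow := by
  induction x_ generalizing acc with
  | nil => simp
  | cons s t ih =>
      simp only [List.foldl_cons]
      rw [ih]
      simp [pvRow, List.append_assoc]

lemma stride3_flatMap (x_ : List String) (i : Nat) (hi : i < 3) :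
    pvStride3 ((x_.flatMap pvRow).drop i) = x_.map (fun s => (pvRow s)[i]?.getD "") := by
  induction x_ with
  | nil => interval_cases i <;> simp [pvStride3_nil]
  | cons s t ih =>
      have h3 := pvRow_len s
      rcases hr : pvRow s with _ | ⟨a, _ | ⟨b, _ | ⟨c, _ | d⟩⟩⟩ <;> simp [hr] at h3 ⊢
      interval_cases i <;> simp_all [pvStride3_cons]

lemma vertical_split_fold_inv (x_ : List String) (a b c : List String) :
    x_.foldl (fun acc s =>
      let x := (PySem.Str.split? s ", ").getD []
      let first := acc.1 ++ [match PySem.List.pyGet? x 0 with | some v => v | none => "None"]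
      let second := acc.2.1 ++ [match PySem.List.pyGet? x 1 with | some v => v | none => "None"]
      let third := acc.2.2 ++ [match PySem.List.pyGet? x 2 with | some v => v | none => "None"]
      (first, second, third)) (a, b, c)
    = (a ++ x_.map (fun s => (pvRow s)[0]?.getD ""),
       b ++ x_.map (fun s => (pvRow s)[1]?.getD ""),
       c ++ x_.map (fun s => (pvRow s)[2]?.getD "")) := by
  induction x_ generalizing a b c with
  | nil => simp
  | cons s t ih =>
      simp only [List.foldl_cons, List.map_cons, ih]
      refine Prod.ext ?_ (Prod.ext ?_ ?_) <;>
        simp [pvRow_get _ 0 (by omega), pvRow_get _ 1 (by omega), pvRow_get _ 2 (by omega)]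

-- ===== VERDICT (by name: the statement is the Claim_ definition above) =====
theorem vertical_split_spec : Claim_equal_vertical_split := by
  intro x_ _
  show vertical_split x_ = vertical_split_alt x_
  unfold vertical_split vertical_split_alt
  rw [vertical_split_fold_inv]
  simp only [flat_eq_flatMap, List.nil_append]
  have h0 := stride3_flatMap x_ 0 (by omega)
  have h1 := stride3_flatMap x_ 1 (by omega)
  have h2 := stride3_flatMap x_ 2 (by omega)
  simp only [List.drop_zero] at h0
  rw [h0, h1, h2]
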